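-- pv_equiv track=rewrite | github.com/elonhadad/Python | genes.py | next_gene
-- ===== SOURCE A (Python) =====
-- def next_gene(i,s):
--     '''find the gene,The function returns the start index of
--     The gene and the index following the end of the gene.'''
--
--     first_i = s.find("ATG",i)
--     lst = []
--     for index in range(first_i, len(s), 3):
--         last_i = s.find("TAA", index, index+3)
--         lst.append(last_i)
--         last_i = s.find("TGA", index, index+3)
--         lst.append(last_i)
--         last_i = s.find("TAG", index, index+3)
--         lst.append(last_i)
--         if max(lst) > -1:
--             break
--     last_i = max(lst)
--     last_i += 3
--
--     if first_i < 0: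
--         return None
--     return first_i, last_i
-- ===== SOURCE B (Python) =====
-- def _find_inframe(s, c, p, start):
--     '''first occurrence index q >= p of codon c with (q - start) % 3 == 0, else -1.'''
--     q = s.find(c, p)
--     if q < 0:
--         return -1
--     if (q - start) % 3 == 0:
--         return q
--     return _find_inframe(s, c, q + 1, start)
--
-- def next_gene(i, s):
--     '''find the gene: returns (start index, index following the end of the gene), or None.'''
--     start = s.find("ATG", i)
--     if start < 0:
--         return None
--     stops = [_find_inframe(s, c, start, start) for c in ("TAA", "TGA", "TAG")]
--     hits = [p for p in stops if p >= 0]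
--     if not hits:
--         return None
--     return start, min(hits) + 3
-- ===== Notes on version B (the rewrite author's own statement) =====
-- stated objective: faster
-- what changed: B abandons A's frame-by-frame window scan (three bounded finds plus a growing list and max per codon window): it searches the whole string once per stop codon with s.find restarted past out-of-frame hits, then returns the minimum of the three per-codon in-frame positions, and it returns None instead of a meaningless end index when no in-frame stop codon exists.
-- intended difference: On inputs where 'ATG' is found at or after i but no in-frame stop codon (TAA/TGA/TAG) follows it, A returns (start, 2) - the accidental max([-1,...])+3 of its growing list - while B returns None, the intended 'no complete gene' answer. — e.g. on next_gene(0, "ATG"): A returns some (0, 2), B returns none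
import Mathlib
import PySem

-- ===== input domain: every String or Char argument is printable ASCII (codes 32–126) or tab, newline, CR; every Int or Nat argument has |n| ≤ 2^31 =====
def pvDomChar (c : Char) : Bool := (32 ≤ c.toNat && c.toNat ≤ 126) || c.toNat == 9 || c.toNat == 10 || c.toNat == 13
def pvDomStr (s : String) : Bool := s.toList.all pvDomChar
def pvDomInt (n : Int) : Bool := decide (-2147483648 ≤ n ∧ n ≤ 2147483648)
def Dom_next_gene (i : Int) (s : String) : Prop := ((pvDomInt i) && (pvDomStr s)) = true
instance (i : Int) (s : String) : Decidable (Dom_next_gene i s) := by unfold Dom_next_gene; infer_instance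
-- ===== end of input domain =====

-- B searches for each of the three stop codons separately with s.find restarted past
-- out-of-frame hits, then takes the minimum of the per-codon in-frame positions — instead of
-- A's frame-by-frame window scan with a growing list of find results and a max per iteration;
-- B returns None instead of A's accidental end index 2 when no in-frame stop codon exists
-- (see D_next_gene below).

-- ===== PORT A =====
-- A's for-loop with break: recursion over range(first_i, len(s), 3) carrying the growing list lst
def next_gene_loopA (s : String) : List Int → List Int → List Int
  | [], lst => lst
  | index :: rest, lst =>
      let lst := lst ++ [PySem.Str.findFrom s "TAA" index (some (index + 3))]
      let lst := lst ++ [PySem.Str.findFrom s "TGA" index (some (index + 3))]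
      let lst := lst ++ [PySem.Str.findFrom s "TAG" index (some (index + 3))]
      if ((PySem.List.max? lst (fun x => x)).getD 0) > -1 then lst
      else next_gene_loopA s rest lst

def next_gene (i : Int) (s : String) : Option (Int × Int) :=
  let first_i := PySem.Str.findFrom s "ATG" i none
  let lst : List Int := []
  let lst := next_gene_loopA s (PySem.List.pyRange first_i (PySem.Str.len s) 3) lst
  -- Python's max(lst): lst is never empty here (the range above is never empty), so getD 0 is unreachable
  let last_i := (PySem.List.max? lst (fun x => x)).getD 0
  let last_i := last_i + 3
  if first_i < 0 then none else some (first_i, last_i)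

-- ===== PORT B =====
-- _find_inframe(s, c, p, start): first q >= p with s.find(c, q) hit and (q - start) % 3 == 0, else -1.
-- The fuel argument is ONLY a totality guard (each recursive call strictly increases p, which
-- stays ≤ len(s)+1 while a hit exists); fuel = len(s)+1 at the call site is never exhausted.
def pvFindInframe (s c : List Char) (st : Int) : Nat → Nat → Int
  | _, 0 => -1
  | p, fuel + 1 =>
      let q := PySem.Chars.findFrom s c (p : Int) none
      if q < 0 then -1
      else if PySem.Int.mod (q - st) 3 = 0 then q
      else pvFindInframe s c st (q + 1).toNat fuel

def next_gene_alt (i : Int) (s : String) : Option (Int × Int) :=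
  let start := PySem.Str.findFrom s "ATG" i none
  if start < 0 then none
  else
    let stops := [String.toList "TAA", String.toList "TGA", String.toList "TAG"].map
      (fun c => pvFindInframe s.toList c start start.toNat (s.toList.length + 1))
    let hits := stops.filter (fun p => decide (0 ≤ p))
    if hits = [] then none
    else some (start, (PySem.List.min? hits (fun x => x)).getD 0 + 3)

-- ===== PRECONDITION & SPEC =====
-- On inputs where "ATG" occurs at or after i but no in-frame stop codon (TAA/TGA/TAG) follows it,
-- A returns (start, 2) — the accidental max([-1,…])+3 of its implementation — while B returns None,
-- the intended "no complete gene" answer.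
def D_next_gene (i : Int) (s : String) : Prop :=
  0 ≤ PySem.Str.findFrom s "ATG" i none ∧
  ∀ k ∈ PySem.List.pyRange (PySem.Str.findFrom s "ATG" i none) (PySem.Str.len s) 3,
    (List.take 3 (List.drop k.toNat s.toList))
      ∉ [String.toList "TAA", String.toList "TGA", String.toList "TAG"]
instance (i : Int) (s : String) : Decidable (D_next_gene i s) := by unfold D_next_gene; infer_instance

def Spec_next_gene (i : Int) (s : String) (out : Option (Int × Int)) : Prop :=
  ¬ D_next_gene i s → out = next_gene_alt i s
instance (i : Int) (s : String) (out : Option (Int × Int)) : Decidable (Spec_next_gene i s out) := by unfold Spec_next_gene; infer_instance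

def pvDiffWitness_next_gene : Int × String := (0, "ATG")
def pvDiffWitnessOut_next_gene : (Option (Int × Int)) × (Option (Int × Int)) := (some (0, 2), none)

-- ===== CLAIM (what is proved, stated in full; the proofs are below) =====
def Claim_unchanged_next_gene : Prop := ∀ (i : Int) (s : String), Dom_next_gene i s → Spec_next_gene i s (next_gene i s)
def Claim_changed_next_gene : Prop := Dom_next_gene (pvDiffWitness_next_gene.1) (pvDiffWitness_next_gene.2) ∧ D_next_gene (pvDiffWitness_next_gene.1) (pvDiffWitness_next_gene.2) ∧ next_gene (pvDiffWitness_next_gene.1) (pvDiffWitness_next_gene.2) = pvDiffWitnessOut_next_gene.1 ∧ next_gene_alt (pvDiffWitness_next_gene.1) (pvDiffWitness_next_gene.2) = pvDiffWitnessOut_next_gene.2 ∧ pvDiffWitnessOut_next_gene.1 ≠ pvDiffWitnessOut_next_gene.2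
def Claim_exact_next_gene : Prop := ∀ (i : Int) (s : String), Dom_next_gene i s → D_next_gene i s → next_gene i s ≠ next_gene_alt i s

-- ===== LEMMAS AND PROOFS =====

-- the 3-char window starting at k (what s[k:k+3] is for 0 ≤ k)
def pvWin (s : List Char) (k : Int) : List Char := List.take 3 (List.drop k.toNat s)

theorem find_self (sub : List Char) : PySem.Chars.find sub sub = 0 := by
  have hne : PySem.Chars.find sub sub ≠ -1 :=
    (PySem.Chars.find_ne_neg_one_iff sub sub).2 List.infix_rfl
  have hge : 0 ≤ PySem.Chars.find sub sub := by
    have := PySem.Chars.neg_one_le_find sub sub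
    omega
  obtain ⟨hpre, hmin⟩ := PySem.Chars.find_spec hge
  by_contra h
  have h0 : 0 < (PySem.Chars.find sub sub).toNat := by omega
  exact hmin 0 h0 (by simp)

theorem find_short (xs sub : List Char) (hlen : xs.length ≤ sub.length) :
    PySem.Chars.find xs sub = if xs = sub then 0 else -1 := by
  split_ifs with h
  · subst h; exact find_self xs
  · exact (PySem.Chars.find_eq_neg_one_iff xs sub).2 fun hinf =>
      h (List.IsInfix.eq_of_length_le hinf hlen).symm

theorem pvWin_len (s : List Char) (k : Int) : (pvWin s k).length ≤ 3 := by
  simp [pvWin]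

-- s.find(sub, k, k+3) for a 3-char sub and 0 ≤ k: hit at k or -1
theorem findFrom_window (s sub : List Char) (k : Int) (hk : 0 ≤ k) (hsub : sub.length = 3) :
    PySem.Chars.findFrom s sub k (some (k + 3)) =
      if pvWin s k = sub then k else -1 := by
  have hsubne : ([] : List Char) ≠ sub := by
    intro h; rw [← h] at hsub; simp at hsub
  unfold PySem.Chars.findFrom
  dsimp only
  by_cases hlen : (s.length : Int) < k
  · have hwe : pvWin s k = [] := by
      unfold pvWin
      have : s.length ≤ k.toNat := by omega
      simp [List.drop_eq_nil_iff.2 this]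
    rw [hwe]
    simp only [hsubne, if_false]
    split_ifs <;> omega
  · have hst : ¬ k < 0 := by omega
    have he3 : ¬ (k + 3 : Int) < 0 := by omega
    by_cases hc : (s.length : Int) < k + 3
    · simp only [if_pos hc, if_neg hst, if_neg hlen]
      have hcast : ((s.length : Int)).toNat = s.length := Int.toNat_natCast _
      rw [hcast, List.take_length]
      have hwineq : List.drop k.toNat s = pvWin s k := by
        unfold pvWin
        rw [List.take_of_length_le (by simp; omega)]
      rw [hwineq, find_short _ _ (by rw [hsub]; exact pvWin_len s k)]
      split_ifs <;> first | omega | exact False.elim (by assumption)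
    · simp only [if_neg hc, if_neg he3, if_neg hst]
      have hkk : ¬ (k + 3 : Int) < k := by omega
      simp only [if_neg hkk]
      have hwin : List.drop k.toNat (List.take (k+3).toNat s) = pvWin s k := by
        rw [List.drop_take]
        have h3 : (k+3).toNat - k.toNat = 3 := by omega
        rw [h3]; rfl
      rw [hwin, find_short _ _ (by rw [hsub]; exact pvWin_len s k)]
      split_ifs <;> first | omega | exact False.elim (by assumption)

-- is the window at k a stop codon? (shared vocabulary of both loop characterisations)
def pvStop (s : List Char) (k : Int) : Bool :=
  decide (pvWin s k ∈ [String.toList "TAA", String.toList "TGA", String.toList "TAG"])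

theorem foldl_max_neg_one (t : List Int) (ht : ∀ x ∈ t, x = -1) :
    t.foldl max (-1) = -1 := by
  induction t with
  | nil => rfl
  | cons y ys ih =>
    have hy : y = -1 := ht y (by simp)
    simp only [List.foldl_cons, hy, max_self]
    exact ih (fun x hx => ht x (by simp [hx]))

theorem mv_append3 (lst : List Int) (hl : ∀ x ∈ lst, x = -1) (a b c : Int) (ha : -1 ≤ a) :
    (PySem.List.max? (lst ++ [a, b, c]) (fun y => y)).getD 0 = max (max a b) c := by
  cases lst with
  | nil =>
    simp only [List.nil_append, PySem.List.max?_id_cons]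
    simp [List.foldl_cons]
  | cons x t =>
    have hx : x = -1 := hl x (by simp)
    simp only [List.cons_append, PySem.List.max?_id_cons, List.foldl_append]
    have ht : t.foldl max x = -1 := by
      rw [hx]; exact foldl_max_neg_one t (fun y hy => hl y (by simp [hy]))
    rw [ht]
    simp only [List.foldl_cons, List.foldl_nil]
    have : max (-1) a = a := by omega
    rw [this]
    rfl

theorem loopA_eq (s : String) (idxs : List Int) (lst : List Int)
    (hl : ∀ x ∈ lst, x = -1) (h : ∀ k ∈ idxs, 0 ≤ k) :
    ((PySem.List.max? (next_gene_loopA s idxs lst) (fun x => x)).getD 0) =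
      match idxs.find? (pvStop s.toList) with
      | some k => k
      | none => if lst = [] ∧ idxs = [] then 0 else -1 := by
  induction idxs generalizing lst with
  | nil =>
    simp only [next_gene_loopA, List.find?_nil]
    cases lst with
    | nil => rfl
    | cons x t =>
      simp only [PySem.List.max?_id_cons]
      have hx : x = -1 := hl x (by simp)
      rw [hx, foldl_max_neg_one t (fun y hy => hl y (by simp [hy]))]
      simp
  | cons index rest ih =>
    have hk : 0 ≤ index := h index (by simp)
    have e1 : PySem.Str.findFrom s "TAA" index (some (index + 3)) =
        if pvWin s.toList index = String.toList "TAA" then index else -1 := by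
      rw [PySem.Str.findFrom_eq]; exact findFrom_window _ _ _ hk (by decide)
    have e2 : PySem.Str.findFrom s "TGA" index (some (index + 3)) =
        if pvWin s.toList index = String.toList "TGA" then index else -1 := by
      rw [PySem.Str.findFrom_eq]; exact findFrom_window _ _ _ hk (by decide)
    have e3 : PySem.Str.findFrom s "TAG" index (some (index + 3)) =
        if pvWin s.toList index = String.toList "TAG" then index else -1 := by
      rw [PySem.Str.findFrom_eq]; exact findFrom_window _ _ _ hk (by decide)
    have hassoc : lst ++ [PySem.Str.findFrom s "TAA" index (some (index + 3))]
        ++ [PySem.Str.findFrom s "TGA" index (some (index + 3))]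
        ++ [PySem.Str.findFrom s "TAG" index (some (index + 3))]
        = lst ++ [PySem.Str.findFrom s "TAA" index (some (index + 3)),
                  PySem.Str.findFrom s "TGA" index (some (index + 3)),
                  PySem.Str.findFrom s "TAG" index (some (index + 3))] := by
      simp
    have hmv := mv_append3 lst hl
      (PySem.Str.findFrom s "TAA" index (some (index + 3)))
      (PySem.Str.findFrom s "TGA" index (some (index + 3)))
      (PySem.Str.findFrom s "TAG" index (some (index + 3)))
      (by rw [e1]; split_ifs <;> omega)
    unfold next_gene_loopA
    simp only [hassoc]
    by_cases hs : pvStop s.toList index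
    · -- the window is a stop codon: exactly one of the three finds returns index
      have hmax : max (max (PySem.Str.findFrom s "TAA" index (some (index + 3)))
          (PySem.Str.findFrom s "TGA" index (some (index + 3))))
          (PySem.Str.findFrom s "TAG" index (some (index + 3))) = index := by
        rw [e1, e2, e3]
        have hmem := (by simpa [pvStop] using hs :
          pvWin s.toList index ∈ [String.toList "TAA", String.toList "TGA", String.toList "TAG"])
        simp only [List.mem_cons, List.not_mem_nil, or_false] at hmem
        rcases hmem with h1 | h2 | h3
        · rw [if_pos h1, if_neg (by rw [h1]; decide), if_neg (by rw [h1]; decide)]; omega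
        · rw [if_neg (by rw [h2]; decide), if_pos h2, if_neg (by rw [h2]; decide)]; omega
        · rw [if_neg (by rw [h3]; decide), if_neg (by rw [h3]; decide), if_pos h3]; omega
      rw [List.find?_cons_of_pos hs, hmv, hmax]
      rw [if_pos (by omega : (index : Int) > -1)]
      rw [hmv, hmax]
    · -- not a stop codon: all three finds are -1, the loop continues
      have hwna : pvWin s.toList index ∉
          [String.toList "TAA", String.toList "TGA", String.toList "TAG"] := by
        simpa [pvStop] using hs
      simp only [List.mem_cons, List.not_mem_nil, or_false, not_or] at hwna
      have hA : PySem.Str.findFrom s "TAA" index (some (index + 3)) = -1 := by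
        rw [e1, if_neg hwna.1]
      have hB : PySem.Str.findFrom s "TGA" index (some (index + 3)) = -1 := by
        rw [e2, if_neg hwna.2.1]
      have hC : PySem.Str.findFrom s "TAG" index (some (index + 3)) = -1 := by
        rw [e3, if_neg hwna.2.2]
      rw [List.find?_cons_of_neg hs, hmv, hA, hB, hC]
      rw [if_neg (by omega : ¬ (max (max (-1 : Int) (-1)) (-1) > -1))]
      have hrec := ih (lst ++ [(-1 : Int), -1, -1])
        (by intro x hx
            rcases List.mem_append.1 hx with h1 | h2
            · exact hl x h1
            · simp only [List.mem_cons, List.not_mem_nil, or_false] at h2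
              rcases h2 with h2 | h2 | h2 <;> exact h2)
        (fun x hx => h x (by simp [hx]))
      rw [hrec]
      cases hfind : rest.find? (pvStop s.toList) with
      | some k => rfl
      | none => simp

-- every element of range(f, n, 3) with 0 ≤ f is nonnegative
theorem pyRange_nonneg (f n : Int) (hf : 0 ≤ f) :
    ∀ k ∈ PySem.List.pyRange f n 3, 0 ≤ k := by
  intro k hk
  have := (PySem.List.mem_pyRange_iff_of_pos (by omega : (0:Int) < 3) k).1 hk
  omega

-- ---- B-side lemmas ----

-- Python's (q - st) % 3 == 0 test is divisibility by 3
theorem fmod3_eq_zero_iff (x : Int) : PySem.Int.mod x 3 = 0 ↔ 3 ∣ x := by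
  unfold PySem.Int.mod
  rw [Int.fmod_eq_emod]
  rw [if_pos (Or.inl (by norm_num : (0:Int) ≤ 3))]
  omega

-- for a 3-char codon, the window equals the codon iff the codon is a prefix of the tail
theorem win_iff_prefix (s c : List Char) (hc : c.length = 3) (j : Int) :
    pvWin s j = c ↔ c <+: s.drop j.toNat := by
  rw [List.prefix_iff_eq_take, hc, pvWin]
  exact ⟨fun h => h.symm, fun h => h.symm⟩

-- behaviour of findFrom at a nonnegative start with no end bound
theorem findFrom_nat_bounds (s c : List Char) (p : Nat)
    (h : ¬ PySem.Chars.findFrom s c (p : Int) none < 0) :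
    p ≤ s.length ∧ (p : Int) ≤ PySem.Chars.findFrom s c (p : Int) none ∧
      PySem.Chars.findFrom s c (p : Int) none ≤ (s.length : Int) := by
  by_cases hp : p ≤ s.length
  · have hne : PySem.Chars.findFrom s c (p : Int) none ≠ -1 := by
      intro he; rw [he] at h; exact h (by norm_num)
    obtain ⟨h1, _, _⟩ := PySem.Chars.findFrom_natCast_spec s c p hp hne
    refine ⟨hp, h1, ?_⟩
    rw [PySem.Chars.findFrom_natCast s c p hp] at h ⊢
    split_ifs at h ⊢ with hf
    · omega
    · have := PySem.Chars.find_le_length (s.drop p) c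
      simp only [List.length_drop] at this
      omega
  · exfalso
    apply h
    unfold PySem.Chars.findFrom
    have hlt : ((s.length : Int)) < (p : Int) := by omega
    have h1 : ¬ ((p : Int) < 0) := by omega
    simp only [if_neg h1]
    rw [if_pos hlt]
    norm_num

-- full specification of pvFindInframe, provided enough fuel:
-- either -1 and no in-frame occurrence at or after p, or the FIRST in-frame occurrence ≥ p
theorem inframe_spec (s c : List Char) (hc : c ≠ []) (st : Int) :
    ∀ (fuel p : Nat), s.length + 1 ≤ fuel + p →
    (pvFindInframe s c st p fuel = -1 ∧
      ∀ j : Int, (p : Int) ≤ j → 3 ∣ (j - st) → ¬ c <+: s.drop j.toNat) ∨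
    ((p : Int) ≤ pvFindInframe s c st p fuel ∧
      3 ∣ (pvFindInframe s c st p fuel - st) ∧
      c <+: s.drop (pvFindInframe s c st p fuel).toNat ∧
      ∀ j : Int, (p : Int) ≤ j → j < pvFindInframe s c st p fuel → 3 ∣ (j - st) →
        ¬ c <+: s.drop j.toNat) := by
  intro fuel
  induction fuel with
  | zero =>
    intro p hfp
    left
    refine ⟨rfl, ?_⟩
    intro j hj _ hpre
    have hdrop : s.drop j.toNat = [] := List.drop_eq_nil_iff.2 (by omega)
    rw [hdrop] at hpre
    exact hc (List.prefix_nil.1 hpre)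
  | succ fuel ih =>
    intro p hfp
    show _ ∨ _
    unfold pvFindInframe
    by_cases hneg : PySem.Chars.findFrom s c (p : Int) none < 0
    · -- no occurrence of c at or after p at all
      rw [if_pos hneg]
      left
      refine ⟨rfl, ?_⟩
      intro j hj _ hpre
      by_cases hp : p ≤ s.length
      · have hm1 : PySem.Chars.findFrom s c (p : Int) none = -1 := by
          rw [PySem.Chars.findFrom_natCast s c p hp] at *
          split_ifs at * with hf
          · rfl
          · have h0 : -1 ≤ PySem.Chars.find (s.drop p) c := PySem.Chars.neg_one_le_find _ _
            omega
        have hninf := (PySem.Chars.findFrom_natCast_eq_neg_one_iff s c p hp).1 hm1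
        apply hninf
        apply (PySem.Chars.isIn_iff_infix c (s.drop p)).1
        apply (PySem.Chars.exists_prefix_drop_iff_isIn c (s.drop p)).1
        refine ⟨j.toNat - p, ?_⟩
        rw [List.drop_drop]
        have : p + (j.toNat - p) = j.toNat := by omega
        rw [this]
        exact hpre
      · have hdrop : s.drop j.toNat = [] := List.drop_eq_nil_iff.2 (by omega)
        rw [hdrop] at hpre
        exact hc (List.prefix_nil.1 hpre)
    · obtain ⟨hp, hge, hle⟩ := findFrom_nat_bounds s c p hneg
      have hne : PySem.Chars.findFrom s c (p : Int) none ≠ -1 := by omega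
      obtain ⟨_, hocc, hmin⟩ := PySem.Chars.findFrom_natCast_spec s c p hp hne
      rw [if_neg hneg]
      by_cases hmod : PySem.Int.mod (PySem.Chars.findFrom s c (p : Int) none - st) 3 = 0
      · rw [if_pos hmod]
        right
        refine ⟨hge, (fmod3_eq_zero_iff _).1 hmod, hocc, ?_⟩
        intro j hj hjlt _ hpre
        exact hmin j.toNat (by omega) (by omega) hpre
      · rw [if_neg hmod]
        -- recurse past the out-of-frame hit
        have hq := ih ((PySem.Chars.findFrom s c (p : Int) none + 1).toNat) (by omega)
        rcases hq with ⟨hm1, hnone⟩ | ⟨hge', hdvd', hocc', hmin'⟩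
        · left
          refine ⟨hm1, ?_⟩
          intro j hj hdvd hpre
          by_cases hjq : (PySem.Chars.findFrom s c (p : Int) none + 1 : Int) ≤ j
          · exact hnone j (by omega) hdvd hpre
          · -- j ≤ findFrom: j < findFrom has no occurrence; j = findFrom is out of frame
            by_cases hjlt : j < PySem.Chars.findFrom s c (p : Int) none
            · exact hmin j.toNat (by omega) (by omega) hpre
            · have hjeq : j = PySem.Chars.findFrom s c (p : Int) none := by omega
              apply hmod
              rw [fmod3_eq_zero_iff, ← hjeq]
              exact hdvd
        · right
          refine ⟨by omega, hdvd', hocc', ?_⟩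
          intro j hj hjlt hdvd hpre
          by_cases hjq : (PySem.Chars.findFrom s c (p : Int) none + 1 : Int) ≤ j
          · exact hmin' j (by omega) hjlt hdvd hpre
          · by_cases hjlt2 : j < PySem.Chars.findFrom s c (p : Int) none
            · exact hmin j.toNat (by omega) (by omega) hpre
            · have hjeq : j = PySem.Chars.findFrom s c (p : Int) none := by omega
              apply hmod
              rw [fmod3_eq_zero_iff, ← hjeq]
              exact hdvd

-- find? on a strictly increasing list returns the minimum satisfying element
theorem find?_sorted_min {l : List Int} (hs : l.Pairwise (· < ·)) (p : Int → Bool) {k : Int}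
    (h : l.find? p = some k) : k ∈ l ∧ p k = true ∧ ∀ j ∈ l, j < k → p j = false := by
  induction l with
  | nil => simp at h
  | cons x t ih =>
    rcases List.pairwise_cons.1 hs with ⟨hx, ht⟩
    by_cases hpx : p x
    · rw [List.find?_cons_of_pos hpx] at h
      obtain rfl : x = k := by injection h
      refine ⟨by simp, hpx, ?_⟩
      intro j hj hjk
      rcases List.mem_cons.1 hj with rfl | hmem
      · omega
      · exact absurd (hx j hmem) (by omega)
    · rw [List.find?_cons_of_neg (by simpa using hpx)] at h
      obtain ⟨hmem, hpk, hmin⟩ := ih ht h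
      refine ⟨by simp [hmem], hpk, ?_⟩
      intro j hj hjk
      rcases List.mem_cons.1 hj with rfl | hmem'
      · simpa using hpx
      · exact hmin j hmem' hjk

theorem pyRange3_sorted (a b : Int) : (PySem.List.pyRange a b 3).Pairwise (· < ·) := by
  rw [PySem.List.pyRange_of_pos a b (by norm_num : (0:Int) < 3)]
  exact List.Pairwise.map _ (fun x y hxy => by omega) List.pairwise_lt_range

-- an in-frame 3-char occurrence at j ≥ f lies in range(f, len s, 3) and is a stop window
theorem occ_mem_range (s c : List Char) (hc : c.length = 3) (f j : Int) (_hf : 0 ≤ f)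
    (hj : f ≤ j) (hdvd : 3 ∣ (j - f)) (hocc : c <+: s.drop j.toNat) :
    j ∈ PySem.List.pyRange f (s.length : Int) 3 := by
  have hlen : 3 ≤ (s.drop j.toNat).length := by
    have := hocc.length_le
    omega
  simp only [List.length_drop] at hlen
  exact (PySem.List.mem_pyRange_iff_of_pos (by norm_num) j).2 ⟨hj, by omega, hdvd⟩

-- B's value for a nonnegative start, characterised by find? over the A-side frame range
theorem alt_characterised (s : String) (f : Int) (hf : 0 ≤ f) :
    (let stops := [String.toList "TAA", String.toList "TGA", String.toList "TAG"].map
        (fun c => pvFindInframe s.toList c f f.toNat (s.toList.length + 1));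
     let hits := stops.filter (fun p => decide (0 ≤ p));
     if hits = [] then none
     else some (f, (PySem.List.min? hits (fun x => x)).getD 0 + 3)) =
      match (PySem.List.pyRange f (s.toList.length : Int) 3).find? (pvStop s.toList) with
      | some k => some (f, k + 3)
      | none => (none : Option (Int × Int)) := by
  have hfn : ((f.toNat : Int)) = f := Int.toNat_of_nonneg hf
  have hspec : ∀ c ∈ [String.toList "TAA", String.toList "TGA", String.toList "TAG"],
      c.length = 3 := by decide
  set F := fun c => pvFindInframe s.toList c f f.toNat (s.toList.length + 1) with hF
  -- each computed stop: either -1 (no in-frame occurrence ≥ f) or the first one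
  have key : ∀ c ∈ [String.toList "TAA", String.toList "TGA", String.toList "TAG"],
      (F c = -1 ∧
        ∀ j : Int, f ≤ j → 3 ∣ (j - f) → ¬ c <+: s.toList.drop j.toNat) ∨
      (f ≤ F c ∧ 3 ∣ (F c - f) ∧ c <+: s.toList.drop (F c).toNat ∧
        ∀ j : Int, f ≤ j → j < F c → 3 ∣ (j - f) → ¬ c <+: s.toList.drop j.toNat) := by
    intro c hcmem
    have hclen := hspec c hcmem
    have := inframe_spec s.toList c (by intro h; rw [h] at hclen; simp at hclen) f
      (s.toList.length + 1) f.toNat (by omega)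
    rwa [hfn] at this
  -- membership description of hits
  have hhits : ∀ x, x ∈ ([String.toList "TAA", String.toList "TGA", String.toList "TAG"].map F).filter
      (fun p => decide (0 ≤ p)) ↔
      (0 ≤ x ∧ ∃ c ∈ [String.toList "TAA", String.toList "TGA", String.toList "TAG"], F c = x) := by
    intro x
    simp [List.mem_filter, and_comm, eq_comm]
  cases hfc : (PySem.List.pyRange f (s.toList.length : Int) 3).find? (pvStop s.toList) with
  | none =>
    -- no stop window anywhere in the range: every computed stop is -1, hits is empty
    have hnon := List.find?_eq_none.1 hfc
    have hall : ∀ c ∈ [String.toList "TAA", String.toList "TGA", String.toList "TAG"],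
        F c = -1 := by
      intro c hcmem
      rcases key c hcmem with ⟨hm1, _⟩ | ⟨hge, hdvd, hocc, _⟩
      · exact hm1
      · exfalso
        have hmem := occ_mem_range s.toList c (hspec c hcmem) f (F c) hf hge hdvd hocc
        apply hnon (F c) hmem
        simp only [pvStop, decide_eq_true_eq]
        rw [(win_iff_prefix s.toList c (hspec c hcmem) (F c)).mpr hocc]
        exact hcmem
    have hempty : ([String.toList "TAA", String.toList "TGA", String.toList "TAG"].map F).filter
        (fun p => decide (0 ≤ p)) = [] := by
      apply List.filter_eq_nil_iff.2
      intro x hx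
      rcases List.mem_map.1 hx with ⟨c, hcmem, rfl⟩
      rw [hall c hcmem]
      simp
    rw [if_pos hempty]
  | some k =>
    obtain ⟨hkmem, hkstop, hkmin⟩ := find?_sorted_min (pyRange3_sorted f _) _ hfc
    obtain ⟨hkf, hklen, hkdvd⟩ := (PySem.List.mem_pyRange_iff_of_pos (by norm_num) k).1 hkmem
    -- the codon at k
    have hkwin : ∃ c0 ∈ [String.toList "TAA", String.toList "TGA", String.toList "TAG"],
        pvWin s.toList k = c0 := by
      simpa [pvStop] using hkstop
    obtain ⟨c0, hc0mem, hc0win⟩ := hkwin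
    have hc0len := hspec c0 hc0mem
    have hkocc : c0 <+: s.toList.drop k.toNat := (win_iff_prefix s.toList c0 hc0len k).1 hc0win
    -- c0's computed stop equals k
    have hFc0 : F c0 = k := by
      rcases key c0 hc0mem with ⟨_, hnone⟩ | ⟨hge, hdvd, hocc, hmin⟩
      · exact absurd hkocc (hnone k hkf hkdvd)
      · -- F c0 ≤ k by its own minimality; k ≤ F c0 by find?'s minimality
        have h1 : ¬ k < F c0 := fun hlt => (hmin k hkf hlt hkdvd) hkocc
        have h2 : ¬ F c0 < k := by
          intro hlt
          have hmem := occ_mem_range s.toList c0 hc0len f (F c0) hf hge hdvd hocc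
          have := hkmin (F c0) hmem hlt
          simp only [pvStop, decide_eq_false_iff_not] at this
          exact this (by rw [(win_iff_prefix s.toList c0 hc0len (F c0)).2 hocc]; exact hc0mem)
        omega
    -- k is in hits, and every hit is ≥ k
    have hkin : k ∈ ([String.toList "TAA", String.toList "TGA", String.toList "TAG"].map F).filter
        (fun p => decide (0 ≤ p)) := by
      rw [hhits]
      exact ⟨by omega, c0, hc0mem, hFc0⟩
    have hlb : ∀ x ∈ ([String.toList "TAA", String.toList "TGA", String.toList "TAG"].map F).filter
        (fun p => decide (0 ≤ p)), k ≤ x := by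
      intro x hx
      rcases (hhits x).1 hx with ⟨hx0, c, hcmem, rfl⟩
      rcases key c hcmem with ⟨hm1, _⟩ | ⟨hge, hdvd, hocc, _⟩
      · omega
      · by_contra hlt
        replace hlt : F c < k := by omega
        have hmem := occ_mem_range s.toList c (hspec c hcmem) f (F c) hf hge hdvd hocc
        have := hkmin (F c) hmem hlt
        simp only [pvStop, decide_eq_false_iff_not] at this
        exact this (by rw [(win_iff_prefix s.toList c (hspec c hcmem) (F c)).2 hocc]; exact hcmem)
    have hne : ([String.toList "TAA", String.toList "TGA", String.toList "TAG"].map F).filter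
        (fun p => decide (0 ≤ p)) ≠ [] := by
      intro h; rw [h] at hkin; simp at hkin
    simp only [if_neg hne]
    -- min? is some m with m ∈ hits (so k ≤ m) and m ≤ k (k ∈ hits)
    cases hm : PySem.List.min? (([String.toList "TAA", String.toList "TGA", String.toList "TAG"].map F).filter
        (fun p => decide (0 ≤ p))) (fun x => x) with
    | none =>
      exfalso
      exact hne ((PySem.List.min?_eq_none_iff _ _).1 hm)
    | some m =>
      have hmmem := PySem.List.min?_mem hm
      have hmk : m ≤ k := PySem.List.min?_isMin hm k hkin
      have hkm : k ≤ m := hlb m hmmem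
      have hmeq : m = k := by omega
      rw [Option.getD_some, hmeq]

-- ===== VERDICT (by name: the statement is the Claim_ definition above) =====
theorem next_gene_spec : Claim_unchanged_next_gene := by
  intro i s _ hnd
  unfold next_gene next_gene_alt
  set f := PySem.Str.findFrom s "ATG" i none with hf
  by_cases hneg : f < 0
  · simp only [if_pos hneg]
  · replace hneg : 0 ≤ f := by omega
    simp only [if_neg (by omega : ¬ f < 0)]
    have hrange := pyRange_nonneg f (PySem.Str.len s) hneg
    have hchar := alt_characterised s f hneg
    simp only at hchar
    have hlen : PySem.Str.len s = (s.toList.length : Int) := by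
      simp [PySem.Str.len]
    rw [← hlen] at hchar
    rw [hchar]
    have hfind : (PySem.List.pyRange f (PySem.Str.len s) 3).find? (pvStop s.toList) ≠ none := by
      intro hnone
      apply hnd
      refine ⟨hneg, ?_⟩
      intro k hkmem hkin
      have := List.find?_eq_none.1 hnone k hkmem
      exact this (by simpa [pvStop, pvWin] using hkin)
    cases hfc : (PySem.List.pyRange f (PySem.Str.len s) 3).find? (pvStop s.toList) with
    | none => exact absurd hfc hfind
    | some k =>
      have := loopA_eq s (PySem.List.pyRange f (PySem.Str.len s) 3) [] (by simp) hrange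
      rw [hfc] at this
      rw [this]

theorem next_gene_changed : Claim_changed_next_gene := by
  unfold Claim_changed_next_gene; decide

theorem next_gene_tight : Claim_exact_next_gene := by
  intro i s _ hd heq
  obtain ⟨hge, hall⟩ := hd
  set f := PySem.Str.findFrom s "ATG" i none with hf
  have hlen : PySem.Str.len s = (s.toList.length : Int) := by
    simp [PySem.Str.len]
  -- B returns none: no stop window in the range
  have hfnone : (PySem.List.pyRange f (s.toList.length : Int) 3).find?
      (pvStop s.toList) = none := by
    apply List.find?_eq_none.2
    intro k hk
    rw [← hlen] at hk
    have := hall k hk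
    simpa [pvStop, pvWin] using this
  have hB : next_gene_alt i s = none := by
    unfold next_gene_alt
    rw [← hf]
    simp only [if_neg (by omega : ¬ f < 0)]
    have hchar := alt_characterised s f hge
    simp only at hchar
    rw [hchar, hfnone]
  -- A returns some
  have hA : next_gene i s ≠ none := by
    unfold next_gene
    rw [← hf]
    simp only [if_neg (by omega : ¬ f < 0)]
    exact Option.some_ne_none _
  rw [heq, hB] at hA
  exact hA rfl
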